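-- pv_equiv track=rewrite | github.com/kathelynn/allysaqt | framework/formatting.py | dict_format
-- ===== SOURCE A (Python) =====
-- from string import Template
--
-- def dict_format(dictionary, stringformat):
--     '''Dictionary formatter'''
--     for key, value in dictionary.items():
--         if isinstance(value, dict):
--             dictionary[key] = dict_format(value, stringformat)
--         else:
--             dictionary[key] = Template(value)
--             dictionary[key] = dictionary[key].substitute(**stringformat)
--     return dictionary
-- ===== SOURCE B (Python) =====
-- # B: instead of delegating each value to string.Template's regex engine, expand
-- # placeholders with a hand-rolled split('$')-based scanner; the nested-dict
-- # recursion becomes an explicit worklist. Mutates the dict in place like A.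
-- def _ident_start(c):
--     return c == '_' or ('a' <= c <= 'z') or ('A' <= c <= 'Z')
--
-- def _ident_cont(c):
--     return _ident_start(c) or ('0' <= c <= '9')
--
-- def _expand(text, stringformat):
--     parts = text.split('$')
--     out = [parts[0]]
--     i = 1
--     n = len(parts)
--     while i < n:
--         part = parts[i]
--         if part == '':
--             # the '$' was immediately followed by '$' (escape) or by end of string
--             if i + 1 >= n:
--                 raise ValueError("Invalid placeholder in string")
--             out.append('$')
--             out.append(parts[i + 1])
--             i += 2
--             continue
--         if part[0] == '{':
--             if len(part) < 2 or not _ident_start(part[1]):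
--                 raise ValueError("Invalid placeholder in string")
--             j = 2
--             while j < len(part) and _ident_cont(part[j]):
--                 j += 1
--             if j >= len(part) or part[j] != '}':
--                 raise ValueError("Invalid placeholder in string")
--             out.append(stringformat[part[1:j]])
--             out.append(part[j + 1:])
--         else:
--             if not _ident_start(part[0]):
--                 raise ValueError("Invalid placeholder in string")
--             j = 1
--             while j < len(part) and _ident_cont(part[j]):
--                 j += 1
--             out.append(stringformat[part[:j]])
--             out.append(part[j:])
--         i += 1
--     return ''.join(out)
--
-- def dict_format(dictionary, stringformat):
--     '''Dictionary formatter'''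
--     stack = [dictionary]
--     while stack:
--         d = stack.pop()
--         for key, value in d.items():
--             if isinstance(value, dict):
--                 stack.append(value)
--             else:
--                 d[key] = _expand(value, stringformat)
--     return dictionary
-- ===== Notes on version B (the rewrite author's own statement) =====
-- stated objective: faster
-- what changed: B replaces string.Template's regex substitution (which re-packs the whole stringformat dict into **kwargs for every value) with a hand-rolled split('$') scanner doing direct dict lookups, and replaces A's recursion into nested dicts with an explicit worklist; both mutate the dict in place.
-- outside the precondition, e.g. on dict_format({'k': '$missing'}, {'name': 'x'}): A raises KeyError, B raises KeyError; on dict_format({'k': 'price: $1'}, {'name': 'x'}): A raises ValueError, B raises ValueError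
import Mathlib
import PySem

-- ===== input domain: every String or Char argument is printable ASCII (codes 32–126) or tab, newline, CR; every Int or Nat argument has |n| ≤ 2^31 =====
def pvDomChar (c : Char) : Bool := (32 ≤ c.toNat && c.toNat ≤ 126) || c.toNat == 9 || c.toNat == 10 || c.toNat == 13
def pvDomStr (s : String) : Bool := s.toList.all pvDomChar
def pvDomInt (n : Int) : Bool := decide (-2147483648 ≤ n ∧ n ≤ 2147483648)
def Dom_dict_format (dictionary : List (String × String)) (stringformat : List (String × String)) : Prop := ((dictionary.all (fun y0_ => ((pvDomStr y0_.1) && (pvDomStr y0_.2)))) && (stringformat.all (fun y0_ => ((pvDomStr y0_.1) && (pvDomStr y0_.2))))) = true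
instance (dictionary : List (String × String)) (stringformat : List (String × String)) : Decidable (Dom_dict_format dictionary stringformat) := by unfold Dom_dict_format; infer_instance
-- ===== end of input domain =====

-- B replaces string.Template's regex substitution by a split('$')-based scanner and the
-- dict recursion by a worklist; equivalence is about the RETURN value (both Pythons also
-- mutate the argument dict in place, identically).
-- On this flat String→String domain the isinstance(value, dict) branch of A (and the
-- worklist of B) never sees a nested dict, so both ports reduce to a per-value update.

-- identifier characters of string.Template's idpattern (?a:[_a-zA-Z][_a-zA-Z0-9]*)
def isIdentStart (c : Char) : Bool := c = '_' || ('a' ≤ c && c ≤ 'z') || ('A' ≤ c && c ≤ 'Z')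
def isIdentCont (c : Char) : Bool := isIdentStart c || ('0' ≤ c && c ≤ '9')

-- ===== PORT A =====
-- Template(value).substitute(**stringformat): the regex scan of Template.substitute,
-- transliterated char by char; `none` = the Python raises (ValueError / KeyError).
def substA (sf : List (String × String)) : List Char → Option (List Char)
  | [] => some []
  | c :: cs =>
    if c = '$' then
      match cs with
      | [] => none                                           -- invalid: lone '$' at end
      | c2 :: cs2 =>
        if c2 = '$' then                                      -- escaped: '$$' → '$'
          Option.map (fun t => '$' :: t) (substA sf cs2)
        else if c2 = '{' then                                 -- braced: '${name}'
          match cs2 with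
          | [] => none
          | c3 :: cs3 =>
            if isIdentStart c3 then
              match _h : cs3.dropWhile isIdentCont with
              | c4 :: cs4 =>
                if c4 = '}' then
                  match List.lookup (String.ofList (c3 :: cs3.takeWhile isIdentCont)) sf with
                  | some v => Option.map (fun t => String.toList v ++ t) (substA sf cs4)
                  | none => none                              -- KeyError
                else none                                     -- invalid placeholder
              | [] => none                                    -- invalid placeholder
            else none                                         -- invalid placeholder
        else if isIdentStart c2 then                          -- named: '$name'
          match List.lookup (String.ofList (c2 :: cs2.takeWhile isIdentCont)) sf with
          | some v => Option.map (fun t => String.toList v ++ t) (substA sf (cs2.dropWhile isIdentCont))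
          | none => none                                      -- KeyError
        else none                                             -- invalid placeholder
    else Option.map (fun t => c :: t) (substA sf cs)
  termination_by cs => cs.length
  decreasing_by
  · simp
  · have := List.length_dropWhile_le isIdentCont cs3
    rw [_h] at this; simp at this ⊢; omega
  · have := List.length_dropWhile_le isIdentCont cs2
    simp at this ⊢; omega
  · simp

-- for key, value in dictionary.items(): dictionary[key] = Template(value).substitute(**sf)
-- (values are strings here, so the isinstance-dict branch never fires; in-place assignment
-- to an existing key of a Python dict keeps its position = value map; where the Python
-- raises — excluded by Pre_ — the port keeps the old value)
def dict_format (dictionary : List (String × String)) (stringformat : List (String × String)) : List (String × String) :=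
  dictionary.map (fun kv =>
    (kv.1, match substA stringformat kv.2.toList with
           | some t => String.ofList t
           | none => kv.2))

-- ===== PORT B =====
-- text.split('$') — exact hand port of str.split with the one-char separator '$'
def splitDollar : List Char → List (List Char)
  | [] => [[]]
  | c :: r =>
    if c = '$' then [] :: splitDollar r
    else
      match splitDollar r with
      | p :: ps => (c :: p) :: ps
      | [] => [[c]]                                           -- unreachable: split is never empty

-- Source B's while-loop over parts[1:], as recursion over that list; `none` = Source B raises
def expandGo (sf : List (String × String)) : List (List Char) → Option (List Char)
  | [] => some []
  | part :: ps =>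
    match part with
    | [] =>                                                   -- '$$' escape (or trailing '$')
      match ps with
      | [] => none
      | q :: qs => Option.map (fun t => '$' :: (q ++ t)) (expandGo sf qs)
    | c :: rest =>
      if c = '{' then                                         -- '${name}...'
        match rest with
        | [] => none
        | c1 :: r1 =>
          if isIdentStart c1 then
            match r1.dropWhile isIdentCont with
            | c2 :: r2 =>
              if c2 = '}' then
                match List.lookup (String.ofList (c1 :: r1.takeWhile isIdentCont)) sf with
                | some v => Option.map (fun t => String.toList v ++ (r2 ++ t)) (expandGo sf ps)
                | none => none
              else none
            | [] => none
          else none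
      else if isIdentStart c then                             -- '$name...'
        match List.lookup (String.ofList (c :: rest.takeWhile isIdentCont)) sf with
        | some v => Option.map (fun t => String.toList v ++ (rest.dropWhile isIdentCont ++ t)) (expandGo sf ps)
        | none => none
      else none

def expandB (sf : List (String × String)) (text : List Char) : Option (List Char) :=
  match splitDollar text with
  | p :: ps => Option.map (fun t => p ++ t) (expandGo sf ps)
  | [] => none                                                -- unreachable

-- worklist loop: on this flat domain it visits only the top dict → per-value update
def dict_format_alt (dictionary : List (String × String)) (stringformat : List (String × String)) : List (String × String) :=
  dictionary.map (fun kv =>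
    (kv.1, match expandB stringformat kv.2.toList with
           | some t => String.ofList t
           | none => kv.2))

-- ===== PRECONDITION & SPEC =====
-- A small state machine (grammar check) for one template value: every '$' must
-- introduce '$$', '$name' or '${name}' with the name among stringformat's keys —
-- exactly the inputs on which Template.substitute returns (else the Python A
-- raises ValueError or KeyError, which Pre_ excludes).
inductive TmplState where
  | plain : TmplState                       -- ordinary text
  | dollar : TmplState                      -- just read an unescaped '$'
  | named : List Char → TmplState           -- reading a bare name (reversed accumulator)
  | braced0 : TmplState                     -- just read '${'
  | braced : List Char → TmplState          -- reading a braced name (reversed accumulator)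
  | fail : TmplState                        -- the template is invalid / a name unbound
deriving DecidableEq, Repr

def tmplStep (keys : List String) (s : TmplState) (c : Char) : TmplState :=
  match s with
  | .fail => .fail
  | .plain => if c = '$' then .dollar else .plain
  | .dollar =>
    if c = '$' then .plain
    else if c = '{' then .braced0
    else if isIdentStart c then .named [c]
    else .fail
  | .named acc =>
    if isIdentCont c then .named (c :: acc)
    else if keys.contains (String.ofList acc.reverse) then
      (if c = '$' then .dollar else .plain)
    else .fail
  | .braced0 => if isIdentStart c then .braced [c] else .fail
  | .braced acc =>
    if isIdentCont c then .braced (c :: acc)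
    else if c = '}' && keys.contains (String.ofList acc.reverse) then .plain
    else .fail

def tmplAccept (keys : List String) : TmplState → Bool
  | .plain => true
  | .named acc => keys.contains (String.ofList acc.reverse)
  | _ => false

def tmplOk (keys : List String) (cs : List Char) : Bool :=
  tmplAccept keys (cs.foldl (tmplStep keys) .plain)

-- Pre_: every value of the dictionary is a well-formed template over stringformat's keys
def Pre_dict_format (dictionary : List (String × String)) (stringformat : List (String × String)) : Prop :=
  dictionary.all (fun kv => tmplOk (stringformat.map Prod.fst) kv.2.toList) = true
instance (dictionary : List (String × String)) (stringformat : List (String × String)) : Decidable (Pre_dict_format dictionary stringformat) := by unfold Pre_dict_format; infer_instance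

def pvWitness_dict_format : (List (String × String)) × (List (String × String)) :=
  ([("greet", "hello $name, $$5 in ${place}!")], [("name", "world"), ("place", "here")])

def Spec_dict_format (dictionary : List (String × String)) (stringformat : List (String × String)) (out : List (String × String)) : Prop := out = dict_format_alt dictionary stringformat
instance (dictionary : List (String × String)) (stringformat : List (String × String)) (out : List (String × String)) : Decidable (Spec_dict_format dictionary stringformat out) := by unfold Spec_dict_format; infer_instance

-- ===== CLAIM (what is proved, stated in full; the proofs are below) =====
def Claim_equal_dict_format : Prop := ∀ (dictionary : List (String × String)) (stringformat : List (String × String)), Dom_dict_format dictionary stringformat → Pre_dict_format dictionary stringformat → Spec_dict_format dictionary stringformat (dict_format dictionary stringformat)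

-- ===== LEMMAS AND PROOFS =====

-- characters this proof distinguishes: '$' (the split separator) vs everything else
def notDollar (c : Char) : Bool := c != '$'

-- the tail of splitDollar: parts after the first '$'
def sTail (r : List Char) : List (List Char) :=
  match r.dropWhile notDollar with
  | [] => []
  | _ :: r' => splitDollar r'

theorem identCont_notDollar {c : Char} (h : isIdentCont c = true) : notDollar c = true := by
  by_cases hc : c = '$'
  · subst hc; simp [isIdentCont, isIdentStart] at h
  · simp [notDollar, hc]

theorem split_shape (r : List Char) :
    splitDollar r = r.takeWhile notDollar :: sTail r := by
  induction r with
  | nil => simp [splitDollar, sTail]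
  | cons c r ih =>
    by_cases hc : c = '$'
    · subst hc
      simp [splitDollar, sTail, notDollar]
    · simp only [splitDollar, if_neg hc, ih, sTail, List.takeWhile_cons, List.dropWhile_cons]
      simp [notDollar, hc]

theorem take_take (r : List Char) :
    (r.takeWhile notDollar).takeWhile isIdentCont = r.takeWhile isIdentCont := by
  induction r with
  | nil => simp
  | cons c r ih =>
    by_cases hic : isIdentCont c
    · rw [List.takeWhile_cons_of_pos (identCont_notDollar hic), List.takeWhile_cons_of_pos hic,
        List.takeWhile_cons_of_pos hic, ih]
    · by_cases hnd : notDollar c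
      · rw [List.takeWhile_cons_of_pos hnd, List.takeWhile_cons_of_neg (by simpa using hic),
          List.takeWhile_cons_of_neg (by simpa using hic)]
      · rw [List.takeWhile_cons_of_neg (by simpa using hnd),
          List.takeWhile_cons_of_neg (by simpa using hic)]
        simp

theorem drop_decomp (r : List Char) :
    r.dropWhile isIdentCont = (r.takeWhile notDollar).dropWhile isIdentCont ++ r.dropWhile notDollar := by
  induction r with
  | nil => simp
  | cons c r ih =>
    by_cases hic : isIdentCont c
    · rw [List.dropWhile_cons_of_pos hic, List.takeWhile_cons_of_pos (identCont_notDollar hic),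
        List.dropWhile_cons_of_pos hic, List.dropWhile_cons_of_pos (identCont_notDollar hic), ih]
    · by_cases hnd : notDollar c
      · rw [List.dropWhile_cons_of_neg (by simpa using hic), List.takeWhile_cons_of_pos hnd,
          List.dropWhile_cons_of_neg (by simpa using hic), List.dropWhile_cons_of_pos hnd]
        simp [List.takeWhile_append_dropWhile]
      · rw [List.dropWhile_cons_of_neg (by simpa using hic),
          List.takeWhile_cons_of_neg (by simpa using hnd),
          List.dropWhile_cons_of_neg (by simpa using hnd)]
        simp

theorem mem_dropTake_notDollar {r : List Char} {x : Char}
    (hx : x ∈ (r.takeWhile notDollar).dropWhile isIdentCont) : notDollar x = true :=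
  List.mem_takeWhile_imp ((List.dropWhile_sublist _).mem hx)

theorem tk_append {a d : List Char} (ha : ∀ x ∈ a, notDollar x = true) :
    (a ++ d).takeWhile notDollar = a ++ d.takeWhile notDollar := by
  induction a with
  | nil => simp
  | cons c a ih =>
    rw [List.cons_append, List.takeWhile_cons_of_pos (ha c (by simp))]
    simp [ih (fun x hx => ha x (by simp [hx]))]

theorem dp_append {a d : List Char} (ha : ∀ x ∈ a, notDollar x = true) :
    (a ++ d).dropWhile notDollar = d.dropWhile notDollar := by
  induction a with
  | nil => simp
  | cons c a ih =>
    rw [List.cons_append, List.dropWhile_cons_of_pos (ha c (by simp))]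
    exact ih (fun x hx => ha x (by simp [hx]))

theorem dp_idem (r : List Char) :
    (r.dropWhile notDollar).dropWhile notDollar = r.dropWhile notDollar := by
  cases h : r.dropWhile notDollar with
  | nil => simp
  | cons c r' =>
    have hc : notDollar c = false := by
      have := List.head_dropWhile_not notDollar (l := r) (by simp [h])
      simpa [h] using this
    rw [List.dropWhile_cons_of_neg (by simp [hc])]

-- sTail is insensitive to a notDollar prefix and to taking dropWhile notDollar
theorem sTail_append {a d : List Char} (ha : ∀ x ∈ a, notDollar x = true) :
    sTail (a ++ d) = sTail d := by
  unfold sTail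
  rw [dp_append ha]

theorem sTail_dp (r : List Char) : sTail (r.dropWhile notDollar) = sTail r := by
  unfold sTail
  rw [dp_idem]

theorem sTail_cons_of_pos {c : Char} (r : List Char) (hc : notDollar c = true) :
    sTail (c :: r) = sTail r := by
  unfold sTail
  rw [List.dropWhile_cons_of_pos hc]

theorem tk_dp (r : List Char) :
    (r.dropWhile notDollar).takeWhile notDollar = [] := by
  cases h : r.dropWhile notDollar with
  | nil => simp
  | cons c r' =>
    have hc : notDollar c = false := by
      have := List.head_dropWhile_not notDollar (l := r) (by simp [h])
      simpa [h] using this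
    rw [List.takeWhile_cons_of_neg (by simp [hc])]

-- one-step reductions of the substA scan at a '$'
theorem substA_brace_none (sf : List (String × String)) (c3 : Char) (cs3 : List Char)
    (his : isIdentStart c3 = true) (hscr : cs3.dropWhile isIdentCont = []) :
    substA sf ('$' :: '{' :: c3 :: cs3) = none := by
  rw [substA.eq_def]; simp [his]
  split
  · rename_i c4 cs4 heq; rw [hscr] at heq; simp at heq
  · rfl

theorem substA_brace_reduce (sf : List (String × String)) (c3 : Char) (cs3 : List Char)
    (his : isIdentStart c3 = true) (c4 : Char) (cs4 : List Char)
    (hscr : cs3.dropWhile isIdentCont = c4 :: cs4) :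
    substA sf ('$' :: '{' :: c3 :: cs3) =
      (if c4 = '}' then
        match List.lookup (String.ofList (c3 :: cs3.takeWhile isIdentCont)) sf with
        | some v => Option.map (fun t => String.toList v ++ t) (substA sf cs4)
        | none => none
      else none) := by
  rw [substA.eq_def]; simp [his]
  split
  · rename_i c4' cs4' heq
    rw [hscr] at heq
    injection heq with h1 h2
    subst h1; subst h2
    rfl
  · rename_i heq
    rw [hscr] at heq
    simp at heq

theorem substA_named (sf : List (String × String)) (c2 : Char) (cs2 : List Char)
    (hc2 : ¬ c2 = '$') (hbr : ¬ c2 = '{') (his : isIdentStart c2 = true) :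
    substA sf ('$' :: c2 :: cs2) =
      (match List.lookup (String.ofList (c2 :: cs2.takeWhile isIdentCont)) sf with
       | some v => Option.map (fun t => String.toList v ++ t) (substA sf (cs2.dropWhile isIdentCont))
       | none => none) := by
  rw [substA.eq_def]; simp [hc2, hbr, his]

theorem substA_named_bad (sf : List (String × String)) (c2 : Char) (cs2 : List Char)
    (hc2 : ¬ c2 = '$') (hbr : ¬ c2 = '{') (his : isIdentStart c2 = false) :
    substA sf ('$' :: c2 :: cs2) = none := by
  rw [substA.eq_def]; simp [hc2, hbr, his]

-- the key lemma: the regex scan of Template.substitute equals the split-based scan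
theorem main_lemma (sf : List (String × String)) :
    ∀ (n : ℕ) (cs : List Char), cs.length ≤ n →
      substA sf cs =
        Option.map (fun t => cs.takeWhile notDollar ++ t) (expandGo sf (sTail cs)) := by
  intro n
  induction n with
  | zero =>
    intro cs h
    have hcs : cs = [] := by cases cs with
      | nil => rfl
      | cons a l => simp at h
    subst hcs
    simp [substA, sTail, expandGo]
  | succ n ih =>
    intro cs hlen
    rcases cs with _ | ⟨c, cs⟩
    · simp [substA, sTail, expandGo]
    by_cases hc : c = '$'
    case neg =>
      have hnd : notDollar c = true := by simp [notDollar, hc]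
      rw [List.takeWhile_cons_of_pos hnd, sTail_cons_of_pos _ hnd]
      have hlhs : substA sf (c :: cs) = Option.map (fun t => c :: t) (substA sf cs) := by
        rw [substA.eq_def]; simp [hc]
      rw [hlhs, ih cs (by simp at hlen; omega)]
      cases expandGo sf (sTail cs) <;> simp
    case pos =>
      subst hc
      have htk : List.takeWhile notDollar ('$' :: cs) = [] := by
        rw [List.takeWhile_cons_of_neg (by simp [notDollar])]
      have hst : sTail ('$' :: cs) = splitDollar cs := by
        unfold sTail
        rw [List.dropWhile_cons_of_neg (by simp [notDollar])]
      rw [htk, hst, split_shape cs]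
      rcases cs with _ | ⟨c2, cs2⟩
      · simp [substA, expandGo, sTail]
      by_cases hc2 : c2 = '$'
      · subst hc2
        have htk2 : List.takeWhile notDollar ('$' :: cs2) = [] := by
          rw [List.takeWhile_cons_of_neg (by simp [notDollar])]
        have hst2 : sTail ('$' :: cs2) = splitDollar cs2 := by
          unfold sTail
          rw [List.dropWhile_cons_of_neg (by simp [notDollar])]
        have hlhs : substA sf ('$' :: '$' :: cs2) = Option.map (fun t => '$' :: t) (substA sf cs2) := by
          rw [substA.eq_def]; simp
        rw [htk2, hst2, split_shape cs2, hlhs, ih cs2 (by simp at hlen; omega)]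
        have hrhs : expandGo sf ([] :: List.takeWhile notDollar cs2 :: sTail cs2)
            = Option.map (fun t => '$' :: (List.takeWhile notDollar cs2 ++ t)) (expandGo sf (sTail cs2)) := by
          simp [expandGo]
        rw [hrhs]
        cases expandGo sf (sTail cs2) <;> simp
      have hnd2 : notDollar c2 = true := by simp [notDollar, hc2]
      rw [List.takeWhile_cons_of_pos hnd2, sTail_cons_of_pos _ hnd2]
      by_cases hbr : c2 = '{'
      · subst hbr
        rcases cs2 with _ | ⟨c3, cs3⟩
        · simp [substA, expandGo]
        by_cases hc3 : c3 = '$'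
        · subst hc3
          have htk3 : List.takeWhile notDollar ('$' :: cs3) = [] := by
            rw [List.takeWhile_cons_of_neg (by simp [notDollar])]
          have hisd : isIdentStart '$' = false := by decide
          rw [htk3]
          simp [substA, expandGo, hisd]
        have hnd3 : notDollar c3 = true := by simp [notDollar, hc3]
        rw [List.takeWhile_cons_of_pos hnd3, sTail_cons_of_pos _ hnd3]
        by_cases his : isIdentStart c3 = true
        case neg =>
          have his' : isIdentStart c3 = false := by simpa using his
          simp [substA, expandGo, his']
        case pos =>
          have hdec := drop_decomp cs3
          have hlen3 : cs3.length + 3 ≤ n + 1 := by simpa using hlen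
          rcases hA : (List.takeWhile notDollar cs3).dropWhile isIdentCont with _ | ⟨c4, a'⟩
          · -- no ident run inside the part: the next char (if any) is a '$', never '}'
            rw [hA, List.nil_append] at hdec
            have hlhs : substA sf ('$' :: '{' :: c3 :: cs3) = none := by
              rcases hd : List.dropWhile notDollar cs3 with _ | ⟨e, d'⟩
              · rw [hd] at hdec
                exact substA_brace_none sf c3 cs3 his hdec
              · have he : notDollar e = false := by
                  have := List.head_dropWhile_not notDollar (l := cs3) (by simp [hd])
                  simpa [hd] using this
                have he' : e = '$' := by
                  by_contra hne
                  simp [notDollar, hne] at he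
                subst he'
                rw [hd] at hdec
                rw [substA_brace_reduce sf c3 cs3 his '$' d' hdec]
                simp
            have hrhs : expandGo sf (('{' :: c3 :: List.takeWhile notDollar cs3) :: sTail cs3) = none := by
              simp [expandGo, his, hA]
            rw [hlhs, hrhs]
            simp
          · -- ident run then c4 inside the part
            have ha' : ∀ x ∈ a', notDollar x = true := fun x hx =>
              mem_dropTake_notDollar (r := cs3) (by rw [hA]; exact List.mem_cons_of_mem _ hx)
            have hscrA : cs3.dropWhile isIdentCont = c4 :: (a' ++ List.dropWhile notDollar cs3) := by
              rw [hdec, hA, List.cons_append]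
            by_cases h4 : c4 = '}'
            case neg =>
              have hlhs : substA sf ('$' :: '{' :: c3 :: cs3) = none := by
                rw [substA_brace_reduce sf c3 cs3 his c4 _ hscrA]
                simp [h4]
              have hrhs : expandGo sf (('{' :: c3 :: List.takeWhile notDollar cs3) :: sTail cs3) = none := by
                simp [expandGo, his, hA, h4]
              rw [hlhs, hrhs]
              simp
            case pos =>
              subst h4
              have hname := take_take cs3
              rcases hlk : List.lookup (String.ofList (c3 :: cs3.takeWhile isIdentCont)) sf with _ | v
              · have hlhs : substA sf ('$' :: '{' :: c3 :: cs3) = none := by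
                  rw [substA_brace_reduce sf c3 cs3 his '}' _ hscrA]
                  simp [hlk]
                have hrhs : expandGo sf (('{' :: c3 :: List.takeWhile notDollar cs3) :: sTail cs3) = none := by
                  simp [expandGo, his, hA, hname, hlk]
                rw [hlhs, hrhs]
                simp
              · have hrec := ih (a' ++ List.dropWhile notDollar cs3) (by
                  have h1 := List.length_dropWhile_le isIdentCont cs3
                  rw [hscrA] at h1
                  simp at h1 ⊢
                  omega)
                have hta : (a' ++ List.dropWhile notDollar cs3).takeWhile notDollar = a' := by
                  rw [tk_append ha', tk_dp, List.append_nil]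
                have hsa : sTail (a' ++ List.dropWhile notDollar cs3) = sTail cs3 := by
                  rw [sTail_append ha', sTail_dp]
                rw [hta, hsa] at hrec
                have hlhs : substA sf ('$' :: '{' :: c3 :: cs3)
                    = Option.map (fun t => String.toList v ++ t)
                        (substA sf (a' ++ List.dropWhile notDollar cs3)) := by
                  rw [substA_brace_reduce sf c3 cs3 his '}' _ hscrA]
                  simp [hlk]
                have hrhs : expandGo sf (('{' :: c3 :: List.takeWhile notDollar cs3) :: sTail cs3)
                    = Option.map (fun t => String.toList v ++ (a' ++ t)) (expandGo sf (sTail cs3)) := by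
                  simp [expandGo, his, hA, hname, hlk]
                rw [hlhs, hrec, hrhs]
                cases expandGo sf (sTail cs3) <;> simp
      · -- named placeholder '$name' (or invalid char)
        by_cases his : isIdentStart c2 = true
        case neg =>
          have his' : isIdentStart c2 = false := by simpa using his
          rw [substA_named_bad sf c2 cs2 hc2 hbr his']
          have hrhs : expandGo sf ((c2 :: List.takeWhile notDollar cs2) :: sTail cs2) = none := by
            simp [expandGo, hbr, his']
          rw [hrhs]
          simp
        case pos =>
          have hdec := drop_decomp cs2
          have hname := take_take cs2
          have hlen2 : cs2.length + 2 ≤ n + 1 := by simpa using hlen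
          rcases hlk : List.lookup (String.ofList (c2 :: cs2.takeWhile isIdentCont)) sf with _ | v
          · have hlhs : substA sf ('$' :: c2 :: cs2) = none := by
              rw [substA_named sf c2 cs2 hc2 hbr his]
              simp [hlk]
            have hrhs : expandGo sf ((c2 :: List.takeWhile notDollar cs2) :: sTail cs2) = none := by
              simp [expandGo, his, hbr, hname, hlk]
            rw [hlhs, hrhs]
            simp
          · have ha : ∀ x ∈ (List.takeWhile notDollar cs2).dropWhile isIdentCont, notDollar x = true :=
              fun x hx => mem_dropTake_notDollar hx
            have hrec := ih (cs2.dropWhile isIdentCont) (by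
              have h1 := List.length_dropWhile_le isIdentCont cs2
              omega)
            rw [hdec] at hrec
            have hta : ((List.takeWhile notDollar cs2).dropWhile isIdentCont
                ++ List.dropWhile notDollar cs2).takeWhile notDollar
                = (List.takeWhile notDollar cs2).dropWhile isIdentCont := by
              rw [tk_append ha, tk_dp, List.append_nil]
            have hsa : sTail ((List.takeWhile notDollar cs2).dropWhile isIdentCont
                ++ List.dropWhile notDollar cs2) = sTail cs2 := by
              rw [sTail_append ha, sTail_dp]
            rw [hta, hsa] at hrec
            have hlhs : substA sf ('$' :: c2 :: cs2)
                = Option.map (fun t => String.toList v ++ t) (substA sf (cs2.dropWhile isIdentCont)) := by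
              rw [substA_named sf c2 cs2 hc2 hbr his]
              simp [hlk]
            have hrhs : expandGo sf ((c2 :: List.takeWhile notDollar cs2) :: sTail cs2)
                = Option.map (fun t => String.toList v
                    ++ ((List.takeWhile notDollar cs2).dropWhile isIdentCont ++ t))
                    (expandGo sf (sTail cs2)) := by
              simp [expandGo, his, hbr, hname, hlk]
            rw [hlhs, hdec, hrec, hrhs]
            cases expandGo sf (sTail cs2) <;> simp

theorem substA_eq_expandB (sf : List (String × String)) (cs : List Char) :
    substA sf cs = expandB sf cs := by
  rw [expandB, split_shape cs, main_lemma sf cs.length cs le_rfl]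

-- ===== VERDICT (by name: the statement is the Claim_ definition above) =====
theorem dict_format_spec : Claim_equal_dict_format := by
  intro dictionary stringformat _ _
  unfold Spec_dict_format dict_format dict_format_alt
  exact List.map_congr_left (fun kv _ => by rw [substA_eq_expandB])
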